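-- pv_equiv track=rewrite | github.com/torselden/advent_of_code_2018 | torselden-python/Day06/day06.py | calculate_finite_coords
-- ===== SOURCE A (Python) =====
-- def calculate_finite_coords(coords):
--     finite_coords = []
--     for coord in coords:
--         x, y = coord
--         other_coords = [c for c in coords if c != coord]
--
--         top_left = (0,0)
--         bottom_left = (0,350)
--         top_right = (350,0)
--         bottom_right = (350,350)
--
--         xy = False
--         x_ = False
--         y_ = False
--         __ = False
--
--         for other_coord in other_coords:
--             x_o, y_o = other_coord
--
--             if manhattan_dist(other_coord,top_left) < manhattan_dist(coord,top_left):
--                 xy = True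
--             if manhattan_dist(other_coord,bottom_left) < manhattan_dist(coord,bottom_left):
--                 x_ = True
--             if manhattan_dist(other_coord,top_right) < manhattan_dist(coord,top_right):
--                 y_ = True
--             if manhattan_dist(other_coord,bottom_right) < manhattan_dist(coord,bottom_right):
--                 __ = True
--
--             # if x_o > x and y_o > y:
--             #     xy = True
--             # if x_o > x and y_o < y:
--             #     x_ = True
--             # if x_o < x and y_o > y:
--             #     y_ = True
--             # if x_o < x and y_o < y:
--             #     __ = True
--             if xy == True and x_ == True and y_ == True and __ == True:
--                 finite_coords.append(coord)
--                 break
--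
--     return finite_coords
--
-- def manhattan_dist(c, finite_coord):
--     return (abs(c[0]-finite_coord[0]) + abs(c[1]-finite_coord[1]))
-- ===== SOURCE B (Python) =====
-- def calculate_finite_coords(coords):
--     if not coords:
--         return []
--     corners = [(0, 0), (0, 350), (350, 0), (350, 350)]
--     mins = [min(abs(x - cx) + abs(y - cy) for (x, y) in coords)
--             for (cx, cy) in corners]
--     return [c for c in coords
--             if all(abs(c[0] - cx) + abs(c[1] - cy) > m
--                    for (cx, cy), m in zip(corners, mins))]
-- ===== Notes on version B (the rewrite author's own statement) =====
-- stated objective: faster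
-- what changed: Instead of comparing every coord against every other coord (quadratic), B precomputes the global minimum Manhattan distance to each of the 4 corners in one pass and then keeps a coord iff its distance to every corner is strictly above that minimum.
import Mathlib
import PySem

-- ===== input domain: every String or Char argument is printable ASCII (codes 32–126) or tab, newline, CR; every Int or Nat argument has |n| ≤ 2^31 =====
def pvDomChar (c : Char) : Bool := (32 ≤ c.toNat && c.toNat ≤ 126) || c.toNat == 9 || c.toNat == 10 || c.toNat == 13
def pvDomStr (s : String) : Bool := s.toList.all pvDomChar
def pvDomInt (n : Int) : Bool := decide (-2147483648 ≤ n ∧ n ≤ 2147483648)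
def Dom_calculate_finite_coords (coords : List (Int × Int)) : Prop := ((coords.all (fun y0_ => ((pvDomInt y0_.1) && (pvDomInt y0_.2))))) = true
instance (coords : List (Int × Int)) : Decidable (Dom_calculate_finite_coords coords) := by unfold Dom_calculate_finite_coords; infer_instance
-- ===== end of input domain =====

-- B replaces A's quadratic all-pairs corner comparison by one pass computing the global
-- minimum Manhattan distance to each of the 4 corners, then an O(1) check per coord (faster, asymptotic).


-- ===== PORT A =====
-- manhattan_dist
def manhattan_dist (c f : Int × Int) : Int := |c.1 - f.1| + |c.2 - f.2|

-- the inner 'for other_coord in other_coords' loop with its four flags and the break;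
-- returns true iff the break (append) fires
def loopA (coord : Int × Int) : List (Int × Int) → Bool → Bool → Bool → Bool → Bool
  | [], _, _, _, _ => false
  | o :: rest, xy, x_, y_, dd =>
    let xy := if manhattan_dist o (0, 0) < manhattan_dist coord (0, 0) then true else xy
    let x_ := if manhattan_dist o (0, 350) < manhattan_dist coord (0, 350) then true else x_
    let y_ := if manhattan_dist o (350, 0) < manhattan_dist coord (350, 0) then true else y_
    let dd := if manhattan_dist o (350, 350) < manhattan_dist coord (350, 350) then true else dd
    if xy && x_ && y_ && dd then true else loopA coord rest xy x_ y_ dd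

def calculate_finite_coords (coords : List (Int × Int)) : List (Int × Int) :=
  coords.foldl
    (fun finite_coords coord =>
      if loopA coord (coords.filter (fun c => c ≠ coord)) false false false false
      then finite_coords ++ [coord] else finite_coords)
    []

-- ===== PORT B =====
def pvCorners : List (Int × Int) := [(0, 0), (0, 350), (350, 0), (350, 350)]

def calculate_finite_coords_alt (coords : List (Int × Int)) : List (Int × Int) :=
  match coords with
  | [] => []
  | _ =>
    let mins := pvCorners.map (fun cr =>
      (PySem.List.min? (coords.map (fun p => |p.1 - cr.1| + |p.2 - cr.2|)) (fun v => v)).getD 0)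
    coords.filter (fun c =>
      (pvCorners.zip mins).all (fun cm => decide (|c.1 - cm.1.1| + |c.2 - cm.1.2| > cm.2)))

-- ===== PRECONDITION & SPEC =====
def Spec_calculate_finite_coords (coords : List (Int × Int)) (out : List (Int × Int)) : Prop := out = calculate_finite_coords_alt coords
instance (coords : List (Int × Int)) (out : List (Int × Int)) : Decidable (Spec_calculate_finite_coords coords out) := by unfold Spec_calculate_finite_coords; infer_instance

-- ===== CLAIM (what is proved, stated in full; the proofs are below) =====
def Claim_equal_calculate_finite_coords : Prop := ∀ (coords : List (Int × Int)), Dom_calculate_finite_coords coords → Spec_calculate_finite_coords coords (calculate_finite_coords coords)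

-- ===== LEMMAS AND PROOFS =====

-- an updated flag, disjoined with the rest of the scan, unfolds to the original flag and the hit
theorem if_flag_or (p : Prop) [Decidable p] (b r : Bool) :
    ((if p then true else b) || r) = (b || (decide p || r)) := by
  by_cases h : p <;> simp [h]

theorem flag_true (p : Prop) [Decidable p] (b r : Bool) (h : (if p then true else b) = true) :
    (b || (decide p || r)) = true := by
  by_cases hp : p <;> simp_all

-- flags are monotone, the break fires iff all four 'any's hold (given the flags are not all set yet)
theorem loopA_char (coord : Int × Int) (others : List (Int × Int)) :
    ∀ xy x_ y_ dd : Bool, (xy && x_ && y_ && dd) = false →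
    loopA coord others xy x_ y_ dd =
      ((xy || others.any (fun o => manhattan_dist o (0, 0) < manhattan_dist coord (0, 0))) &&
       (x_ || others.any (fun o => manhattan_dist o (0, 350) < manhattan_dist coord (0, 350))) &&
       (y_ || others.any (fun o => manhattan_dist o (350, 0) < manhattan_dist coord (350, 0))) &&
       (dd || others.any (fun o => manhattan_dist o (350, 350) < manhattan_dist coord (350, 350)))) := by
  induction others with
  | nil => intro xy x_ y_ dd h; simpa [loopA] using h
  | cons o rest ih =>
    intro xy x_ y_ dd h
    simp only [loopA, List.any_cons]
    by_cases h1 : ((if manhattan_dist o (0, 0) < manhattan_dist coord (0, 0) then true else xy) &&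
        (if manhattan_dist o (0, 350) < manhattan_dist coord (0, 350) then true else x_) &&
        (if manhattan_dist o (350, 0) < manhattan_dist coord (350, 0) then true else y_) &&
        (if manhattan_dist o (350, 350) < manhattan_dist coord (350, 350) then true else dd)) = true
    · rw [if_pos h1]
      simp only [Bool.and_eq_true] at h1
      obtain ⟨⟨⟨a1, a2⟩, a3⟩, a4⟩ := h1
      rw [flag_true _ _ _ a1, flag_true _ _ _ a2, flag_true _ _ _ a3, flag_true _ _ _ a4]
      rfl
    · rw [if_neg h1, ih _ _ _ _ (Bool.eq_false_iff.mpr h1)]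
      simp only [if_flag_or]

theorem any_filter_ne (coords : List (Int × Int)) (coord : Int × Int) (g : Int × Int → Bool)
    (hg : g coord = false) :
    (coords.filter (fun c => c ≠ coord)).any g = coords.any g := by
  induction coords with
  | nil => rfl
  | cons h t ih =>
    simp only [List.filter_cons, List.any_cons]
    by_cases hc : h = coord
    · subst hc
      rw [if_neg (by simp), ih, hg]
      simp
    · rw [if_pos (by simp [hc]), List.any_cons, ih]

-- for a nonempty list, min? (id key) = some of a member that is a lower bound; any (· < d) ↔ min < d
theorem any_lt_iff_min_lt (xs : List Int) (d : Int) (hne : xs ≠ []) :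
    xs.any (fun v => v < d) = decide (d > (PySem.List.min? xs (fun v => v)).getD 0) := by
  cases hmin : PySem.List.min? xs (fun v => v) with
  | none => exact absurd (((PySem.List.min?_eq_none_iff xs (fun v => v)).mp hmin)) hne
  | some m =>
    have hmem : m ∈ xs := PySem.List.min?_mem hmin
    have hmono : ∀ y ∈ xs, m ≤ y := fun y hy => PySem.List.min?_isMin hmin y hy
    simp only [Option.getD_some]
    by_cases h : m < d
    · simp only [gt_iff_lt, decide_eq_true h]
      exact List.any_eq_true.mpr ⟨m, hmem, by simpa using h⟩
    · simp only [gt_iff_lt, decide_eq_false h]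
      refine List.any_eq_false.mpr ?_
      intro y hy
      have h2 := hmono y hy
      simp only [decide_eq_true_eq]
      omega

-- the per-coordinate predicates of A and B agree (for a nonempty input list)
theorem pred_eq (coords : List (Int × Int)) (coord : Int × Int) (hne : coords ≠ []) :
    loopA coord (coords.filter (fun c => c ≠ coord)) false false false false =
      ((pvCorners.zip (pvCorners.map (fun cr =>
          (PySem.List.min? (coords.map (fun p => |p.1 - cr.1| + |p.2 - cr.2|)) (fun v => v)).getD 0))).all
        (fun cm => decide (|coord.1 - cm.1.1| + |coord.2 - cm.1.2| > cm.2))) := by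
  rw [loopA_char coord _ false false false false rfl]
  have step : ∀ cr : Int × Int,
      (coords.filter (fun c => c ≠ coord)).any (fun o => manhattan_dist o cr < manhattan_dist coord cr) =
      decide (manhattan_dist coord cr >
        (PySem.List.min? (coords.map (fun p => |p.1 - cr.1| + |p.2 - cr.2|)) (fun v => v)).getD 0) := by
    intro cr
    rw [any_filter_ne coords coord _ (by simp)]
    have := any_lt_iff_min_lt (coords.map (fun p => |p.1 - cr.1| + |p.2 - cr.2|))
      (manhattan_dist coord cr) (by simpa using hne)
    rw [← this, List.any_map]
    rfl
  simp only [pvCorners, List.map_cons, List.map_nil, List.zip_cons_cons, List.zip_nil_right,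
    List.all_cons, List.all_nil, Bool.false_or, Bool.and_true]
  rw [step (0, 0), step (0, 350), step (350, 0), step (350, 350)]
  ac_rfl

-- ===== VERDICT (by name: the statement is the Claim_ definition above) =====
theorem calculate_finite_coords_spec : Claim_equal_calculate_finite_coords := by
  intro coords _
  unfold Spec_calculate_finite_coords
  cases coords with
  | nil => rfl
  | cons hd tl =>
    have hne : hd :: tl ≠ ([] : List (Int × Int)) := by simp
    unfold calculate_finite_coords calculate_finite_coords_alt
    rw [PySem.List.foldl_append_ite_eq_filter]
    simp only [List.nil_append]
    apply List.filter_congr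
    intro c _
    simpa using pred_eq (hd :: tl) c hne
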